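-- pv_equiv track=rewrite | github.com/Jaypee2109/multivariate-anomaly-detection | dashboard/datasets.py | anomaly_ranges
-- ===== SOURCE A (Python) =====
-- def anomaly_ranges(mask) -> list[tuple[int, int]]:
--     """Convert a boolean anomaly mask to a list of (start, end) index ranges.
--
--     Each range is inclusive on both ends so it can be passed directly to
--     ``fig.add_vrect(x0=start, x1=end, ...)``.
--     """
--     ranges: list[tuple[int, int]] = []
--     in_range = False
--     start = 0
--     for i, v in enumerate(mask):
--         if v and not in_range:
--             start = i
--             in_range = True
--         elif not v and in_range:
--             ranges.append((start, i - 1))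
--             in_range = False
--     if in_range:
--         ranges.append((start, len(mask) - 1))
--     return ranges
-- ===== SOURCE B (Python) =====
-- def anomaly_ranges(mask) -> list[tuple[int, int]]:
--     """Convert a boolean anomaly mask to a list of (start, end) inclusive index ranges."""
--     idxs = [i for i, v in enumerate(mask) if v]
--     ranges: list[tuple[int, int]] = []
--     if not idxs:
--         return ranges
--     run_start = idxs[0]
--     prev = idxs[0]
--     for j in idxs[1:]:
--         if j != prev + 1:
--             ranges.append((run_start, prev))
--             run_start = j
--         prev = j
--     ranges.append((run_start, prev))
--     return ranges
-- ===== Notes on version B (the rewrite author's own statement) =====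
-- stated objective: alternative
-- what changed: Replaces the in_range boolean state machine over the whole mask by first collecting the true indices in one comprehension and then grouping consecutive runs in a single scan over those indices.
import Mathlib
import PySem

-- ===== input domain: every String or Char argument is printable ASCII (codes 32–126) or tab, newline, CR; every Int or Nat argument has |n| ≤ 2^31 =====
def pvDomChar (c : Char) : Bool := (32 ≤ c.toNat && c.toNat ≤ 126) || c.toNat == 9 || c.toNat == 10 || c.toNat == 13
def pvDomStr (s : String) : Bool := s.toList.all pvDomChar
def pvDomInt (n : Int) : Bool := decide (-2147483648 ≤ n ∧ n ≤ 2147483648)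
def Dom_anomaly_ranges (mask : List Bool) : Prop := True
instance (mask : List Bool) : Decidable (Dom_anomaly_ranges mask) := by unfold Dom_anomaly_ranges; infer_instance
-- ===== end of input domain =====

-- B replaces A's in_range state machine by collecting the true indices and grouping consecutive runs (alternative decomposition, same cost).

-- ===== PORT A =====
-- the for-loop over enumerate(mask): state (ranges, in_range, start), i the current index
def anomalyLoopA : List Bool → Int → List (Int × Int) → Bool → Int →
    (List (Int × Int) × Bool × Int)
  | [], _, ranges, in_range, start => (ranges, in_range, start)
  | v :: t, i, ranges, in_range, start =>
    if v && !in_range then anomalyLoopA t (i + 1) ranges true i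
    else if !v && in_range then anomalyLoopA t (i + 1) (ranges ++ [(start, i - 1)]) false start
    else anomalyLoopA t (i + 1) ranges in_range start

def anomaly_ranges (mask : List Bool) : List (Int × Int) :=
  match anomalyLoopA mask 0 [] false 0 with
  | (ranges, in_range, start) =>
    if in_range then ranges ++ [(start, (mask.length : Int) - 1)] else ranges

-- ===== PORT B =====
-- idxs = [i for i, v in enumerate(mask) if v]
def trueIdxs : List Bool → Int → List Int
  | [], _ => []
  | v :: t, i => if v then i :: trueIdxs t (i + 1) else trueIdxs t (i + 1)

-- the for-loop over idxs[1:]: state (ranges, run_start, prev)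
def groupRuns : List Int → Int → Int → List (Int × Int) → List (Int × Int)
  | [], run_start, prev, ranges => ranges ++ [(run_start, prev)]
  | j :: t, run_start, prev, ranges =>
    if j ≠ prev + 1 then groupRuns t j j (ranges ++ [(run_start, prev)])
    else groupRuns t run_start j ranges

def anomaly_ranges_alt (mask : List Bool) : List (Int × Int) :=
  match trueIdxs mask 0 with
  | [] => []
  | j :: rest => groupRuns rest j j []

-- ===== PRECONDITION & SPEC =====
def Spec_anomaly_ranges (mask : List Bool) (out : List (Int × Int)) : Prop := out = anomaly_ranges_alt mask
instance (mask : List Bool) (out : List (Int × Int)) : Decidable (Spec_anomaly_ranges mask out) := by unfold Spec_anomaly_ranges; infer_instance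

-- ===== CLAIM (what is proved, stated in full; the proofs are below) =====
def Claim_equal_anomaly_ranges : Prop := ∀ (mask : List Bool), Dom_anomaly_ranges mask → Spec_anomaly_ranges mask (anomaly_ranges mask)

-- ===== LEMMAS AND PROOFS =====

-- proof-side view of A: run the loop, then the final append, with the closing index
-- len(mask) - 1 written as i + t.length - 1 relative to the remaining suffix t
def finishA (t : List Bool) (i : Int) (ranges : List (Int × Int)) (in_range : Bool) (start : Int) :
    List (Int × Int) :=
  match anomalyLoopA t i ranges in_range start with
  | (r, inr, s) => if inr then r ++ [(s, i + (t.length : Int) - 1)] else r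

theorem trueIdxs_head_le : ∀ (t : List Bool) (l j : Int) (rest : List Int),
    trueIdxs t l = j :: rest → l ≤ j := by
  intro t
  induction t with
  | nil => intro l j rest h; simp [trueIdxs] at h
  | cons v t ih =>
    intro l j rest h
    by_cases hv : v = true
    · simp [trueIdxs, hv] at h
      omega
    · simp at hv
      simp [trueIdxs, hv] at h
      have := ih (l + 1) j rest h
      omega

theorem finishA_step (v : Bool) (t : List Bool) (i : Int) (r : List (Int × Int)) (inr : Bool)
    (s : Int) :
    finishA (v :: t) i r inr s =
      (if v && !inr then finishA t (i + 1) r true i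
       else if !v && inr then finishA t (i + 1) (r ++ [(s, i - 1)]) false s
       else finishA t (i + 1) r inr s) := by
  have hlen : i + ((t.length : Int) + 1) - 1 = (i + 1) + (t.length : Int) - 1 := by ring
  simp only [finishA, anomalyLoopA, List.length_cons]
  push_cast
  rw [hlen]
  split_ifs <;> rfl

theorem finishA_eq : ∀ (t : List Bool) (i : Int) (acc : List (Int × Int)),
    (∀ rs : Int, finishA t i acc true rs = groupRuns (trueIdxs t i) rs (i - 1) acc) ∧
    (∀ s : Int, finishA t i acc false s =
      match trueIdxs t i with
      | [] => acc
      | j :: rest => groupRuns rest j j acc) := by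
  intro t
  induction t with
  | nil =>
    intro i acc
    refine ⟨fun rs => ?_, fun s => ?_⟩
    · simp [finishA, anomalyLoopA, trueIdxs, groupRuns]
    · simp [finishA, anomalyLoopA, trueIdxs]
  | cons v t ih =>
    intro i acc
    refine ⟨fun rs => ?_, fun s => ?_⟩
    · -- in_range = true
      rw [finishA_step]
      cases v with
      | true =>
        rw [if_neg (by simp), if_neg (by simp)]
        have h := (ih (i + 1) acc).1 rs
        rw [show (i + 1) - 1 = i by ring] at h
        rw [h]
        simp [trueIdxs, groupRuns]
      | false =>
        rw [if_neg (by simp), if_pos (by simp)]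
        have h := (ih (i + 1) (acc ++ [(rs, i - 1)])).2 rs
        rw [h]
        simp only [trueIdxs, Bool.false_eq_true, if_false]
        cases hx : trueIdxs t (i + 1) with
        | nil => simp [groupRuns]
        | cons j rest =>
          have hj : i + 1 ≤ j := trueIdxs_head_le t (i + 1) j rest hx
          simp only [groupRuns]
          rw [if_pos (show j ≠ i - 1 + 1 by omega)]
    · -- in_range = false
      rw [finishA_step]
      cases v with
      | true =>
        rw [if_pos (by simp)]
        have h := (ih (i + 1) acc).1 i
        rw [show (i + 1) - 1 = i by ring] at h
        rw [h]
        simp [trueIdxs]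
      | false =>
        rw [if_neg (by simp), if_neg (by simp)]
        have h := (ih (i + 1) acc).2 s
        rw [h]
        simp [trueIdxs]

theorem anomaly_ranges_eq_finishA (mask : List Bool) :
    anomaly_ranges mask = finishA mask 0 [] false 0 := by
  simp only [anomaly_ranges, finishA, zero_add]

-- ===== VERDICT (by name: the statement is the Claim_ definition above) =====
theorem anomaly_ranges_spec : Claim_equal_anomaly_ranges := by
  intro mask _
  unfold Spec_anomaly_ranges anomaly_ranges_alt
  rw [anomaly_ranges_eq_finishA, (finishA_eq mask 0 []).2 0]
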